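-- pv_equiv track=rewrite | github.com/CasualInterest/Trip_Analysis | analysis_engine.py | split_trip_into_sections
-- ===== SOURCE A (Python) =====
-- def split_trip_into_sections(trip_lines):
--     """
--     Split a trip into two sections at the point where day letters restart
--     Section 1: Everything up to (but not including) the first repeated day + TOTAL CREDIT/PAY
--     Section 2: From the repeated day onwards (no TOTAL CREDIT/PAY)
--
--     Returns: (section1_lines, section2_lines, split_index)
--     """
--     day_letters = []
--     day_line_indices = []
--
--     for i, line in enumerate(trip_lines):
--         if len(line) > 3:
--             day_col = line[1:4].strip()
--             if day_col in ['A', 'B', 'C', 'D', 'E']: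
--                 day_letters.append(day_col)
--                 day_line_indices.append(i)
--
--     if not day_letters:
--         return trip_lines, [], -1
--
--     # Find where first day repeats
--     split_index = -1
--     for i in range(1, len(day_letters)):
--         if day_letters[i] in day_letters[:i]:
--             split_index = day_line_indices[i]
--             break
--
--     if split_index == -1:
--         return trip_lines, [], -1
--
--     # Section 1: From start to split point
--     section1 = trip_lines[:split_index]
--
--     # Add TOTAL CREDIT and TOTAL PAY lines to section 1
--     for line in trip_lines[split_index:]:
--         if 'TOTAL CREDIT' in line or 'TOTAL PAY' in line:
--             section1.append(line)
--
--     # Section 2: From split point to TOTAL CREDIT (excluding it)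
--     section2_end = len(trip_lines)
--     for i in range(split_index, len(trip_lines)):
--         if 'TOTAL CREDIT' in trip_lines[i]:
--             section2_end = i
--             break
--
--     # Section 2 needs ALL header lines (trip number, EFFECTIVE, DAY header, etc.)
--     # Find where day letters start in the original trip
--     first_day_line = day_line_indices[0] if day_line_indices else split_index
--     header_lines = trip_lines[:first_day_line]
--
--     section2 = header_lines + trip_lines[split_index:section2_end]
--
--     return section1, section2, split_index
-- ===== SOURCE B (Python) =====
-- def split_trip_into_sections(trip_lines):
--     """Group day lines by letter: the split point is the minimum second
--     occurrence over the five day letters (rather than a sequential repeat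
--     scan), and the header boundary is the minimum first occurrence."""
--     def day_of(line):
--         if len(line) > 3:
--             d = line[1:4].strip()
--             if d in ('A', 'B', 'C', 'D', 'E'):
--                 return d
--         return None
--
--     days0 = [(i, day_of(line)) for i, line in enumerate(trip_lines)]
--     days = [(i, d) for i, d in days0 if d is not None]
--     firsts = []
--     seconds = []
--     for letter in ('A', 'B', 'C', 'D', 'E'):
--         idxs = [i for i, d in days if d == letter]
--         if idxs:
--             firsts.append(idxs[0])
--         if len(idxs) > 1:
--             seconds.append(idxs[1])
--     if not firsts or not seconds:
--         return trip_lines, [], -1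
--     split_index = min(seconds)
--     first_day_line = min(firsts)
--     section1 = trip_lines[:split_index] + [
--         l for l in trip_lines[split_index:]
--         if 'TOTAL CREDIT' in l or 'TOTAL PAY' in l]
--     tail = []
--     for l in trip_lines[split_index:]:
--         if 'TOTAL CREDIT' in l:
--             break
--         tail.append(l)
--     section2 = trip_lines[:first_day_line] + tail
--     return section1, section2, split_index
-- ===== Notes on version B (the rewrite author's own statement) =====
-- stated objective: alternative
-- what changed: A detects the split sequentially (quadratic membership test of each day letter against the list of previous letters) and then rescans; B groups the day-line indices by letter and computes the split point as the minimum second occurrence over the five letters and the header boundary as the minimum first occurrence, then assembles the sections from slices, a comprehension filter and a break loop.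
import Mathlib
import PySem

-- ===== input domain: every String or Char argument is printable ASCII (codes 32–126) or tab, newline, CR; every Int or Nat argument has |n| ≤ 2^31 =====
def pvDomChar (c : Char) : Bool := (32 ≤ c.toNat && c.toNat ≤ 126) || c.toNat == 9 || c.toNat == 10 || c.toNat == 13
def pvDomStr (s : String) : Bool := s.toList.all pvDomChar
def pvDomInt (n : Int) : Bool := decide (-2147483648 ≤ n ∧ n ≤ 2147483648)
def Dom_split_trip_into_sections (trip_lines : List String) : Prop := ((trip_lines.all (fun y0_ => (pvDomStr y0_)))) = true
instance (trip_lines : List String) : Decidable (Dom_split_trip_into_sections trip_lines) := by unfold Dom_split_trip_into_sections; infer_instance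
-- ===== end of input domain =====

-- B replaces A's sequential repeat scan (quadratic membership in the previous-letters
-- prefix) by per-letter grouping: split = min second occurrence over the five day
-- letters, header boundary = min first occurrence (objective: alternative algorithm).

-- ===== PORT A =====
-- for i in range(1, len(day_letters)): if day_letters[i] in day_letters[:i]: split = day_line_indices[i]; break
def pvA_findSplit (letters : List String) (idxs : List Int) : List Int → Int
  | [] => -1
  | i :: rest =>
      if PySem.List.pyGetD letters i "" ∈ PySem.List.slice letters none (some i) then
        PySem.List.pyGetD idxs i (-1)
      else pvA_findSplit letters idxs rest

-- for i in range(split_index, len(trip_lines)): if 'TOTAL CREDIT' in trip_lines[i]: section2_end = i; break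
def pvA_findEnd (trip_lines : List String) : List Int → Int
  | [] => (trip_lines.length : Int)
  | i :: rest =>
      if PySem.Str.isIn "TOTAL CREDIT" (PySem.List.pyGetD trip_lines i "") then i
      else pvA_findEnd trip_lines rest

def split_trip_into_sections (trip_lines : List String) : List String × List String × Int :=
  let collected := (PySem.List.enumerate trip_lines 0).foldl
      (fun (acc : List String × List Int) (p : Int × String) =>
        if PySem.Str.len p.2 > 3 then
          let day_col := PySem.Str.strip (PySem.Str.slice p.2 (some 1) (some 4))
          if day_col ∈ ["A", "B", "C", "D", "E"] then (acc.1 ++ [day_col], acc.2 ++ [p.1])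
          else acc
        else acc) ([], [])
  let day_letters := collected.1
  let day_line_indices := collected.2
  if day_letters = [] then (trip_lines, [], -1) else
  let split_index := pvA_findSplit day_letters day_line_indices
      (PySem.List.pyRange 1 (day_letters.length : Int) 1)
  if split_index = -1 then (trip_lines, [], -1) else
  let section1₀ := PySem.List.slice trip_lines none (some split_index)
  let section1 := (PySem.List.slice trip_lines (some split_index) none).foldl
      (fun acc line =>
        if PySem.Str.isIn "TOTAL CREDIT" line || PySem.Str.isIn "TOTAL PAY" line then acc ++ [line]
        else acc) section1₀
  let section2_end := pvA_findEnd trip_lines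
      (PySem.List.pyRange split_index (trip_lines.length : Int) 1)
  let first_day_line := if day_line_indices ≠ [] then PySem.List.pyGetD day_line_indices 0 split_index
      else split_index
  let header_lines := PySem.List.slice trip_lines none (some first_day_line)
  let section2 := header_lines ++ PySem.List.slice trip_lines (some split_index) (some section2_end)
  (section1, section2, split_index)

-- ===== PORT B =====
-- def day_of(line): …
def pvDayOf (line : String) : Option String :=
  if PySem.Str.len line > 3 then
    (if PySem.Str.strip (PySem.Str.slice line (some 1) (some 4)) ∈ ["A", "B", "C", "D", "E"]
     then some (PySem.Str.strip (PySem.Str.slice line (some 1) (some 4))) else none)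
  else none

-- idxs = [i for i, d in days if d == letter]
def pvOccs (days : List (Int × String)) (letter : String) : List Int :=
  (days.filter (fun p => p.2 == letter)).map Prod.fst

-- for l in …: if 'TOTAL CREDIT' in l: break; tail.append(l)
def pvB_take : List String → List String
  | [] => []
  | l :: rest => if PySem.Str.isIn "TOTAL CREDIT" l then [] else l :: pvB_take rest

def split_trip_into_sections_alt (trip_lines : List String) : List String × List String × Int :=
  let days0 := (PySem.List.enumerate trip_lines 0).map (fun p => (p.1, pvDayOf p.2))
  let days := days0.filterMap (fun p => p.2.map (fun d => (p.1, d)))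
  let fs := ["A", "B", "C", "D", "E"].foldl
      (fun (acc : List Int × List Int) letter =>
        let idxs := pvOccs days letter
        ((if idxs ≠ [] then acc.1 ++ [PySem.List.pyGetD idxs 0 0] else acc.1),
         (if idxs.length > 1 then acc.2 ++ [PySem.List.pyGetD idxs 1 0] else acc.2)))
      ([], [])
  if fs.1 = [] ∨ fs.2 = [] then (trip_lines, [], -1) else
  let split_index := (PySem.List.min? fs.2 (fun x => x)).getD 0
  let first_day_line := (PySem.List.min? fs.1 (fun x => x)).getD 0
  let section1 := PySem.List.slice trip_lines none (some split_index) ++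
      (PySem.List.slice trip_lines (some split_index) none).filter
        (fun l => PySem.Str.isIn "TOTAL CREDIT" l || PySem.Str.isIn "TOTAL PAY" l)
  let tail := pvB_take (PySem.List.slice trip_lines (some split_index) none)
  let section2 := PySem.List.slice trip_lines none (some first_day_line) ++ tail
  (section1, section2, split_index)

-- ===== PRECONDITION & SPEC =====
def Spec_split_trip_into_sections (trip_lines : List String) (out : List String × List String × Int) : Prop := out = split_trip_into_sections_alt trip_lines
instance (trip_lines : List String) (out : List String × List String × Int) : Decidable (Spec_split_trip_into_sections trip_lines out) := by unfold Spec_split_trip_into_sections; infer_instance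

-- ===== CLAIM (what is proved, stated in full; the proofs are below) =====
def Claim_equal_split_trip_into_sections : Prop := ∀ (trip_lines : List String), Dom_split_trip_into_sections trip_lines → Spec_split_trip_into_sections trip_lines (split_trip_into_sections trip_lines)

-- ===== LEMMAS AND PROOFS =====

def pvDays (l : List (Int × String)) : List (Int × String) :=
  l.filterMap (fun p => (pvDayOf p.2).map (fun d => (p.1, d)))

-- reference sequential repeat search (what A's split search computes)
def pvFirstRep : List (Int × String) → PySem.Set String → Int → Int × Int
  | [], _, fdl => (-1, fdl)
  | (i, d) :: rest, seen, fdl =>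
      if d ∈ seen then (i, fdl)
      else pvFirstRep rest (PySem.Set.add seen d) (if fdl = -1 then i else fdl)

-- all repeat indices, in order
def pvRepeats : List (Int × String) → PySem.Set String → List Int
  | [], _ => []
  | (i, d) :: rest, seen =>
      if d ∈ seen then i :: pvRepeats rest (PySem.Set.add seen d)
      else pvRepeats rest (PySem.Set.add seen d)

-- per-letter "second occurrence" relative to a seen set
def pvSecondO (seen : PySem.Set String) (d : String) (days : List (Int × String)) : Option Int :=
  if d ∈ seen then (pvOccs days d).head? else (pvOccs days d)[1]?

theorem pvTakeWhile_take {α : Type} (p : α → Bool) (l : List α) :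
    l.take (l.takeWhile p).length = l.takeWhile p := by
  induction l with
  | nil => simp
  | cons a l ih => cases h : p a <;> simp [h, ih]

theorem pvDayOf_eq_some (line : String) (h3 : PySem.Str.len line > 3)
    (hd : PySem.Str.strip (PySem.Str.slice line (some 1) (some 4)) ∈ ["A", "B", "C", "D", "E"]) :
    pvDayOf line = some (PySem.Str.strip (PySem.Str.slice line (some 1) (some 4))) := by
  unfold pvDayOf; rw [if_pos h3, if_pos hd]

theorem pvDayOf_eq_none_of_not_mem (line : String) (h3 : PySem.Str.len line > 3)
    (hd : PySem.Str.strip (PySem.Str.slice line (some 1) (some 4)) ∉ ["A", "B", "C", "D", "E"]) :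
    pvDayOf line = none := by
  unfold pvDayOf; rw [if_pos h3, if_neg hd]

theorem pvDayOf_eq_none_of_short (line : String) (h3 : ¬ PySem.Str.len line > 3) :
    pvDayOf line = none := by
  unfold pvDayOf; rw [if_neg h3]

theorem pvDayOf_mem_L {line d : String} (h : pvDayOf line = some d) :
    d ∈ ["A", "B", "C", "D", "E"] := by
  by_cases h3 : PySem.Str.len line > 3
  · by_cases hd : PySem.Str.strip (PySem.Str.slice line (some 1) (some 4)) ∈ ["A", "B", "C", "D", "E"]
    · rw [pvDayOf_eq_some line h3 hd] at h
      rw [← Option.some.inj h]; exact hd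
    · rw [pvDayOf_eq_none_of_not_mem line h3 hd] at h; cases h
  · rw [pvDayOf_eq_none_of_short line h3] at h; cases h

theorem pvDays_cons_some {i : Int} {line : String} {d : String} {rest : List (Int × String)}
    (h : pvDayOf line = some d) : pvDays ((i, line) :: rest) = (i, d) :: pvDays rest := by
  simp [pvDays, h]

theorem pvDays_cons_none {i : Int} {line : String} {rest : List (Int × String)}
    (h : pvDayOf line = none) : pvDays ((i, line) :: rest) = pvDays rest := by
  simp [pvDays, h]

theorem pvA_collect_eq (l : List (Int × String)) : ∀ (acc : List String × List Int),
    l.foldl (fun (acc : List String × List Int) (p : Int × String) =>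
        if PySem.Str.len p.2 > 3 then
          let day_col := PySem.Str.strip (PySem.Str.slice p.2 (some 1) (some 4))
          if day_col ∈ ["A", "B", "C", "D", "E"] then (acc.1 ++ [day_col], acc.2 ++ [p.1])
          else acc
        else acc) acc
      = (acc.1 ++ (pvDays l).map Prod.snd, acc.2 ++ (pvDays l).map Prod.fst) := by
  induction l with
  | nil => intro acc; simp [pvDays]
  | cons p rest ih =>
    intro acc
    obtain ⟨i, line⟩ := p
    rw [List.foldl_cons]
    by_cases h3 : PySem.Str.len line > 3
    · by_cases hd : PySem.Str.strip (PySem.Str.slice line (some 1) (some 4)) ∈ ["A", "B", "C", "D", "E"]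
      · simp only [if_pos h3, if_pos hd]
        rw [ih, pvDays_cons_some (pvDayOf_eq_some line h3 hd)]
        simp [List.append_assoc]
      · simp only [if_pos h3, if_neg hd]
        rw [ih, pvDays_cons_none (pvDayOf_eq_none_of_not_mem line h3 hd)]
    · simp only [if_neg h3]
      rw [ih, pvDays_cons_none (pvDayOf_eq_none_of_short line h3)]

theorem pvA_findSplit_eq (rest : List (Int × String)) : ∀ (pre : List (Int × String))
    (seen : PySem.Set String) (fdl : Int), pre ≠ [] →
    (∀ x, x ∈ seen ↔ x ∈ pre.map Prod.snd) →
    pvA_findSplit ((pre ++ rest).map Prod.snd) ((pre ++ rest).map Prod.fst)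
        (PySem.List.pyRange (pre.length : Int) ((pre ++ rest).length : Int) 1)
      = (pvFirstRep rest seen fdl).1 := by
  induction rest with
  | nil =>
    intro pre seen fdl _ _
    simp only [List.append_nil]
    rw [show PySem.List.pyRange (pre.length : Int) (pre.length : Int) 1 = [] from by
      simp [PySem.List.pyRange]]
    simp [pvA_findSplit, pvFirstRep]
  | cons q rest' ih =>
    intro pre seen fdl hpre hseen
    obtain ⟨i, d⟩ := q
    have hlt : (pre.length : Int) < ((pre ++ (i, d) :: rest').length : Int) := by
      simp only [List.length_append, List.length_cons]
      push_cast; omega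
    rw [PySem.List.pyRange_one_cons hlt]
    simp only [pvA_findSplit]
    have hget : PySem.List.pyGetD ((pre ++ (i, d) :: rest').map Prod.snd) (pre.length : Int) "" = d := by
      rw [PySem.List.pyGetD_natCast]
      simp [List.map_append, List.getD_eq_getElem?_getD]
    have hslice : PySem.List.slice ((pre ++ (i, d) :: rest').map Prod.snd) none
        (some (pre.length : Int)) = pre.map Prod.snd := by
      rw [PySem.List.slice_to_natCast, List.map_append,
        show pre.length = (pre.map Prod.snd).length from by simp]
      exact List.take_left
    rw [hget, hslice]
    by_cases hmem : d ∈ pre.map Prod.snd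
    · rw [if_pos hmem]
      have hgeti : PySem.List.pyGetD ((pre ++ (i, d) :: rest').map Prod.fst)
          (pre.length : Int) (-1) = i := by
        rw [PySem.List.pyGetD_natCast]
        simp [List.map_append, List.getD_eq_getElem?_getD]
      rw [hgeti]
      have hdseen : d ∈ seen := (hseen d).2 hmem
      simp [pvFirstRep, hdseen]
    · rw [if_neg hmem]
      have hdseen : ¬ d ∈ seen := fun h => hmem ((hseen d).1 h)
      have hstep : pvFirstRep ((i, d) :: rest') seen fdl
          = pvFirstRep rest' (PySem.Set.add seen d) (if fdl = -1 then i else fdl) := by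
        simp [pvFirstRep, hdseen]
      rw [hstep]
      have heq : pre ++ (i, d) :: rest' = (pre ++ [(i, d)]) ++ rest' := by simp
      rw [heq, show (pre.length : Int) + 1 = ((pre ++ [(i, d)]).length : Int) from by simp]
      exact ih (pre ++ [(i, d)]) (PySem.Set.add seen d) (if fdl = -1 then i else fdl)
        (by simp)
        (fun x => by
          rw [PySem.Set.mem_add, hseen x]
          simp [List.map_append, or_comm])

theorem pvA_findEnd_eq (suf : List String) : ∀ (pre : List String),
    pvA_findEnd (pre ++ suf) (PySem.List.pyRange (pre.length : Int) (((pre ++ suf).length : Int)) 1)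
      = (pre.length : Int)
        + ((suf.takeWhile (fun line => !PySem.Str.isIn "TOTAL CREDIT" line)).length : Int) := by
  induction suf with
  | nil =>
    intro pre
    simp only [List.append_nil]
    rw [show PySem.List.pyRange (pre.length : Int) (pre.length : Int) 1 = [] from by
      simp [PySem.List.pyRange]]
    simp [pvA_findEnd]
  | cons line suf' ih =>
    intro pre
    have hlt : (pre.length : Int) < ((pre ++ line :: suf').length : Int) := by
      simp only [List.length_append, List.length_cons]
      push_cast; omega
    rw [PySem.List.pyRange_one_cons hlt]
    simp only [pvA_findEnd]
    have hget : PySem.List.pyGetD (pre ++ line :: suf') (pre.length : Int) "" = line := by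
      rw [PySem.List.pyGetD_natCast]
      simp [List.getD_eq_getElem?_getD]
    rw [hget]
    cases htc : PySem.Str.isIn "TOTAL CREDIT" line with
    | true =>
      rw [if_pos rfl]
      simp only [List.takeWhile_cons]
      rw [htc]
      simp only [Bool.not_true]
      rw [if_neg (by decide)]
      simp
    | false =>
      rw [if_neg (by decide)]
      have heq : pre ++ line :: suf' = (pre ++ [line]) ++ suf' := by simp
      rw [heq, show (pre.length : Int) + 1 = ((pre ++ [line]).length : Int) from by simp]
      rw [ih (pre ++ [line])]
      simp only [List.takeWhile_cons]
      rw [htc]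
      simp only [Bool.not_false]
      simp only [if_true, List.length_cons, List.length_append, List.length_nil]
      push_cast; ring

theorem pvDays_enumerate_shape (trip_lines : List String) :
    ∀ p ∈ pvDays (PySem.List.enumerate trip_lines 0),
      ∃ k : Nat, k < trip_lines.length ∧ p.1 = (k : Int) := by
  intro p hp
  simp only [pvDays, List.mem_filterMap] at hp
  obtain ⟨q, hq, hEq⟩ := hp
  rw [PySem.List.mem_enumerate_iff] at hq
  obtain ⟨k, hk, rfl⟩ := hq
  rcases Option.map_eq_some_iff.1 hEq with ⟨d, _, rfl⟩
  exact ⟨k, hk, by simp⟩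

theorem pvDays_fst_sublist (l : List (Int × String)) :
    ((pvDays l).map Prod.fst).Sublist (l.map Prod.fst) := by
  induction l with
  | nil => simp [pvDays]
  | cons p rest ih =>
    obtain ⟨i, line⟩ := p
    cases h : pvDayOf line with
    | none =>
      rw [pvDays_cons_none h, List.map_cons]
      exact ih.cons i
    | some d =>
      rw [pvDays_cons_some h, List.map_cons, List.map_cons]
      exact ih.cons₂ i

theorem pvDays_letters (l : List (Int × String)) :
    ∀ p ∈ pvDays l, p.2 ∈ ["A", "B", "C", "D", "E"] := by
  intro p hp
  simp only [pvDays, List.mem_filterMap] at hp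
  obtain ⟨q, _, hEq⟩ := hp
  rcases Option.map_eq_some_iff.1 hEq with ⟨d, hd, rfl⟩
  exact pvDayOf_mem_L hd

theorem pvOccs_subset (days : List (Int × String)) (d : String) {x : Int}
    (h : x ∈ pvOccs days d) : x ∈ days.map Prod.fst := by
  simp only [pvOccs, List.mem_map, List.mem_filter] at h
  obtain ⟨p, ⟨hp, _⟩, rfl⟩ := h
  exact List.mem_map_of_mem hp

theorem pvSecondO_mem {seen : PySem.Set String} {d : String} {days : List (Int × String)} {x : Int}
    (h : pvSecondO seen d days = some x) : x ∈ days.map Prod.fst := by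
  unfold pvSecondO at h
  split_ifs at h
  · exact pvOccs_subset days d (List.mem_of_mem_head? (by rw [h]; simp))
  · exact pvOccs_subset days d (List.mem_of_getElem? h)

theorem pvMin?_eq_some {xs : List Int} {m : Int} (hm : m ∈ xs) (hlb : ∀ x ∈ xs, m ≤ x) :
    PySem.List.min? xs (fun x => x) = some m := by
  cases h : PySem.List.min? xs (fun x => x) with
  | none => rw [PySem.List.min?_eq_none_iff] at h; subst h; cases hm
  | some m' =>
    have h1 := PySem.List.min?_mem h
    have h2 := PySem.List.min?_isMin h m hm
    have h3 := hlb m' h1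
    simp only at h2
    rw [le_antisymm h2 h3]

theorem pvFirstRep_fst (l : List (Int × String)) : ∀ seen fdl,
    (pvFirstRep l seen fdl).1 = (pvRepeats l seen).headD (-1) := by
  induction l with
  | nil => intro seen fdl; simp [pvFirstRep, pvRepeats]
  | cons p rest ih =>
    intro seen fdl
    obtain ⟨i, d⟩ := p
    by_cases h : d ∈ seen <;> simp [pvFirstRep, pvRepeats, h, ih]

theorem pvSecondO_step (i : Int) (d0 : String) (rest : List (Int × String))
    (seen : PySem.Set String) (d : String) (hd0 : d0 ∉ seen) :
    pvSecondO seen d ((i, d0) :: rest) = pvSecondO (PySem.Set.add seen d0) d rest := by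
  by_cases hdd : d = d0
  · subst hdd
    have h1 : pvOccs ((i, d) :: rest) d = i :: pvOccs rest d := by
      simp [pvOccs]
    have h2 : d ∈ PySem.Set.add seen d := (PySem.Set.mem_add seen d d).2 (Or.inr rfl)
    unfold pvSecondO
    rw [if_neg hd0, if_pos h2, h1]
    simp [List.head?_eq_getElem?]
  · have h1 : pvOccs ((i, d0) :: rest) d = pvOccs rest d := by
      simp [pvOccs, Ne.symm hdd]
    have h2 : d ∈ PySem.Set.add seen d0 ↔ d ∈ seen := by
      rw [PySem.Set.mem_add]; simp [hdd]
    unfold pvSecondO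
    rw [h1]
    by_cases hs : d ∈ seen
    · rw [if_pos hs, if_pos (h2.2 hs)]
    · rw [if_neg hs, if_neg (fun hh => hs (h2.1 hh))]

theorem pvKey (days : List (Int × String)) (L : List String) : ∀ (seen : PySem.Set String),
    ((days.map Prod.fst).Pairwise (· < ·)) →
    (∀ p ∈ days, p.2 ∈ L) →
    PySem.List.min? (L.filterMap (fun d => pvSecondO seen d days)) (fun x => x)
      = (pvRepeats days seen).head? := by
  induction days with
  | nil =>
    intro seen _ _
    rw [show (L.filterMap fun d => pvSecondO seen d ([] : List (Int × String))) = [] from by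
      simp [pvSecondO, pvOccs]]
    rw [(PySem.List.min?_eq_none_iff _ _).2 rfl]
    rfl
  | cons p rest ih =>
    intro seen hsort hlet
    obtain ⟨i, d0⟩ := p
    rw [List.map_cons] at hsort
    have hlb := (List.pairwise_cons.1 hsort).1
    have hrest := (List.pairwise_cons.1 hsort).2
    by_cases hd0 : d0 ∈ seen
    · rw [show pvRepeats ((i, d0) :: rest) seen = i :: pvRepeats rest (PySem.Set.add seen d0) from by
        simp [pvRepeats, hd0]]
      have hm : i ∈ L.filterMap (fun d => pvSecondO seen d ((i, d0) :: rest)) := by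
        apply List.mem_filterMap.2
        refine ⟨d0, hlet (i, d0) List.mem_cons_self, ?_⟩
        unfold pvSecondO
        rw [if_pos hd0]
        simp [pvOccs]
      have hlb' : ∀ x ∈ L.filterMap (fun d => pvSecondO seen d ((i, d0) :: rest)), i ≤ x := by
        intro x hx
        obtain ⟨d, _, hfd⟩ := List.mem_filterMap.1 hx
        have := pvSecondO_mem hfd
        rw [List.map_cons] at this
        rcases List.mem_cons.1 this with h | h
        · omega
        · exact le_of_lt (hlb x h)
      rw [pvMin?_eq_some hm hlb']
      rfl
    · rw [show pvRepeats ((i, d0) :: rest) seen = pvRepeats rest (PySem.Set.add seen d0) from by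
        simp [pvRepeats, hd0]]
      rw [List.filterMap_congr (fun d _ => pvSecondO_step i d0 rest seen d hd0)]
      exact ih (PySem.Set.add seen d0) hrest (fun p hp => hlet p (List.mem_cons_of_mem _ hp))

theorem pvFirsts (days : List (Int × String)) (L : List String)
    (hsort : (days.map Prod.fst).Pairwise (· < ·))
    (hlet : ∀ p ∈ days, p.2 ∈ L) :
    PySem.List.min? (L.filterMap (fun d => (pvOccs days d).head?)) (fun x => x)
      = (days.map Prod.fst).head? := by
  cases days with
  | nil =>
    rw [show (L.filterMap fun d => (pvOccs ([] : List (Int × String)) d).head?) = [] from by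
      simp [pvOccs]]
    rw [(PySem.List.min?_eq_none_iff _ _).2 rfl]
    rfl
  | cons p rest =>
    obtain ⟨i, d0⟩ := p
    rw [List.map_cons] at hsort ⊢
    have hlb := (List.pairwise_cons.1 hsort).1
    have hm : i ∈ L.filterMap (fun d => (pvOccs ((i, d0) :: rest) d).head?) := by
      apply List.mem_filterMap.2
      refine ⟨d0, hlet (i, d0) List.mem_cons_self, ?_⟩
      simp [pvOccs]
    have hlb' : ∀ x ∈ L.filterMap (fun d => (pvOccs ((i, d0) :: rest) d).head?), i ≤ x := by
      intro x hx
      obtain ⟨d, _, hfd⟩ := List.mem_filterMap.1 hx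
      have hx' := pvOccs_subset _ d (List.mem_of_mem_head? (Option.mem_def.2 hfd))
      rw [List.map_cons] at hx'
      rcases List.mem_cons.1 hx' with h | h
      · omega
      · exact le_of_lt (hlb x h)
    rw [pvMin?_eq_some hm hlb']
    rfl

theorem pvFoldlFS (days : List (Int × String)) (l : List String) : ∀ (a b : List Int),
    l.foldl (fun (acc : List Int × List Int) letter =>
        let idxs := pvOccs days letter
        ((if idxs ≠ [] then acc.1 ++ [PySem.List.pyGetD idxs 0 0] else acc.1),
         (if idxs.length > 1 then acc.2 ++ [PySem.List.pyGetD idxs 1 0] else acc.2))) (a, b)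
      = (a ++ l.filterMap (fun d => (pvOccs days d).head?),
         b ++ l.filterMap (fun d => (pvOccs days d)[1]?)) := by
  induction l with
  | nil => intro a b; simp
  | cons letter rest ih =>
    intro a b
    rw [List.foldl_cons, List.filterMap_cons, List.filterMap_cons]
    cases h : pvOccs days letter with
    | nil => rw [ih]; simp
    | cons y ys =>
      cases hys : ys with
      | nil =>
        rw [ih]
        simp [PySem.List.pyGetD_zero_cons]
      | cons z zs =>
        rw [ih]
        have hz : PySem.List.pyGetD (y :: z :: zs) 1 0 = z := by
          rw [show (1 : Int) = ((1 : Nat) : Int) from rfl, PySem.List.pyGetD_natCast]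
          rfl
        simp [PySem.List.pyGetD_zero_cons, hz]

theorem pvB_take_eq (l : List String) :
    pvB_take l = l.takeWhile (fun x => !PySem.Str.isIn "TOTAL CREDIT" x) := by
  induction l with
  | nil => simp [pvB_take]
  | cons x rest ih =>
    rw [show pvB_take (x :: rest)
        = if PySem.Str.isIn "TOTAL CREDIT" x then [] else x :: pvB_take rest from rfl,
      List.takeWhile_cons, ih]
    cases PySem.Str.isIn "TOTAL CREDIT" x <;> simp

-- ===== VERDICT (by name: the statement is the Claim_ definition above) =====
theorem split_trip_into_sections_spec : Claim_equal_split_trip_into_sections := by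
  intro trip _
  unfold Spec_split_trip_into_sections
  simp only [split_trip_into_sections, split_trip_into_sections_alt]
  rw [pvA_collect_eq]
  rw [show ((PySem.List.enumerate trip 0).map (fun p => (p.1, pvDayOf p.2))).filterMap
        (fun p => p.2.map (fun d => (p.1, d))) = pvDays (PySem.List.enumerate trip 0) from by
      rw [List.filterMap_map]; rfl]
  rw [pvFoldlFS]
  simp only [List.nil_append]
  have hsort : ((pvDays (PySem.List.enumerate trip 0)).map Prod.fst).Pairwise (· < ·) :=
    List.Pairwise.sublist (pvDays_fst_sublist _)
      (List.pairwise_map.mpr (PySem.List.pairwise_lt_enumerate trip 0))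
  have hlet := pvDays_letters (PySem.List.enumerate trip 0)
  have hshape := pvDays_enumerate_shape trip
  cases hds : pvDays (PySem.List.enumerate trip 0) with
  | nil => simp [pvOccs]
  | cons q rest =>
    obtain ⟨i0, d0⟩ := q
    rw [hds] at hsort hlet hshape
    obtain ⟨k0, hk0, hi0⟩ := hshape (i0, d0) List.mem_cons_self
    -- B-side extrema
    have hKey : PySem.List.min?
        ((["A", "B", "C", "D", "E"] : List String).filterMap
          (fun d => (pvOccs ((i0, d0) :: rest) d)[1]?)) (fun x => x)
        = (pvRepeats ((i0, d0) :: rest) PySem.Set.empty).head? := by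
      rw [List.filterMap_congr (g := fun d => pvSecondO PySem.Set.empty d ((i0, d0) :: rest))
        (fun d _ => by
          show (pvOccs ((i0, d0) :: rest) d)[1]? = pvSecondO PySem.Set.empty d ((i0, d0) :: rest)
          unfold pvSecondO
          rw [if_neg (by simp [PySem.Set.empty])])]
      exact pvKey _ _ PySem.Set.empty hsort hlet
    have hFir : PySem.List.min?
        ((["A", "B", "C", "D", "E"] : List String).filterMap
          (fun d => (pvOccs ((i0, d0) :: rest) d).head?)) (fun x => x) = some i0 := by
      rw [pvFirsts _ _ hsort hlet]; rfl
    have hfs1ne : (["A", "B", "C", "D", "E"] : List String).filterMap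
        (fun d => (pvOccs ((i0, d0) :: rest) d).head?) ≠ [] := by
      intro h
      rw [h, (PySem.List.min?_eq_none_iff _ _).2 rfl] at hFir
      cases hFir
    -- A-side split search
    have hseen : ∀ x, x ∈ PySem.Set.add PySem.Set.empty d0 ↔
        x ∈ ([((i0 : Int), d0)].map Prod.snd) := by
      intro x; rw [PySem.Set.mem_add]; simp [PySem.Set.empty]
    have hsplitA := pvA_findSplit_eq rest [(i0, d0)] (PySem.Set.add PySem.Set.empty d0) i0
      (by simp) hseen
    simp only [List.singleton_append, List.map_cons, List.length_cons, List.length_nil] at hsplitA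
    push_cast at hsplitA
    have hstepR : pvRepeats ((i0, d0) :: rest) PySem.Set.empty
        = pvRepeats rest (PySem.Set.add PySem.Set.empty d0) := by
      simp [pvRepeats]
    have hres : pvA_findSplit (d0 :: rest.map Prod.snd) (i0 :: rest.map Prod.fst)
        (PySem.List.pyRange 1 ((rest.length : Int) + 1) 1)
        = (pvRepeats ((i0, d0) :: rest) PySem.Set.empty).headD (-1) := by
      rw [hstepR, ← pvFirstRep_fst rest (PySem.Set.add PySem.Set.empty d0) i0]
      exact hsplitA
    simp only [List.map_cons, List.length_cons, List.length_map]
    push_cast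
    rw [hres]
    cases hrep : pvRepeats ((i0, d0) :: rest) PySem.Set.empty with
    | nil =>
      rw [hrep] at hKey
      have hfs2 : (["A", "B", "C", "D", "E"] : List String).filterMap
          (fun d => (pvOccs ((i0, d0) :: rest) d)[1]?) = [] :=
        (PySem.List.min?_eq_none_iff _ _).1 hKey
      rw [hfs2]
      simp
    | cons m ms =>
      rw [hrep] at hKey
      have hmfs2 : m ∈ (["A", "B", "C", "D", "E"] : List String).filterMap
          (fun d => (pvOccs ((i0, d0) :: rest) d)[1]?) := PySem.List.min?_mem hKey
      have hmmap : m ∈ ((i0, d0) :: rest).map Prod.fst := by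
        obtain ⟨d, _, hfd⟩ := List.mem_filterMap.1 hmfs2
        exact pvOccs_subset _ d (List.mem_of_getElem? hfd)
      obtain ⟨k, hk, hmk⟩ : ∃ k : Nat, k < trip.length ∧ m = (k : Int) := by
        obtain ⟨p, hp, hp1⟩ := List.mem_map.1 hmmap
        obtain ⟨k, hk, hpk⟩ := hshape p hp
        exact ⟨k, hk, by rw [← hp1, hpk]⟩
      have hfs2ne : (["A", "B", "C", "D", "E"] : List String).filterMap
          (fun d => (pvOccs ((i0, d0) :: rest) d)[1]?) ≠ [] := by
        intro h; rw [h] at hmfs2; cases hmfs2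
      have hm1 : (m :: ms).headD (-1) = m := rfl
      rw [hm1]
      rw [if_neg (by rw [hmk]; omega)]
      rw [if_neg (not_or.mpr ⟨hfs1ne, hfs2ne⟩)]
      rw [hKey, hFir]
      simp only [Option.getD_some]
      rw [if_pos (by simp : (i0 :: rest.map Prod.fst) ≠ [])]
      rw [PySem.List.pyGetD_zero_cons]
      rw [PySem.List.foldl_append_if_eq_filter]
      have hend : pvA_findEnd trip (PySem.List.pyRange m (trip.length : Int) 1)
          = m + (((trip.drop k).takeWhile
              (fun line => !PySem.Str.isIn "TOTAL CREDIT" line)).length : Int) := by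
        rw [hmk]
        have h := pvA_findEnd_eq (trip.drop k) (trip.take k)
        rwa [List.take_append_drop, List.length_take, min_eq_left (le_of_lt hk)] at h
      rw [hend, hmk, PySem.List.slice_natCast_add, pvTakeWhile_take,
        PySem.List.slice_from_natCast, pvB_take_eq]
      simp only [List.head?_cons, Option.getD_some]
      rw [PySem.List.slice_from_natCast]
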